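-- pv_equiv track=rewrite | github.com/recursionBlack/leetcodePython | ACMInput/rangeDelete.py | solve
-- ===== SOURCE A (Python) =====
-- from typing import List
--
-- def solve(nums: List[int], k: int) -> int:
--     if k == 0:
--         # 特殊情况：k=0时，所有非空子数组都满足（乘积尾部至少0个0）
--         n = len(nums)
--         return n * (n + 1) // 2
--
--     # 预处理：计算每个数的因子2和因子5的数量
--     cnt2 = []  # 每个元素的因子2数量
--     cnt5 = []  # 每个元素的因子5数量
--     for num in nums:
--         c2, c5 = 0, 0
--         # 统计因子2
--         temp = num
--         while temp % 2 == 0 and temp != 0: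
--             c2 += 1
--             temp //= 2
--         # 统计因子5
--         temp = num
--         while temp % 5 == 0 and temp != 0:
--             c5 += 1
--             temp //= 5
--         cnt2.append(c2)
--         cnt5.append(c5)
--
--     # 计算前缀和（prefix2[i] = 前i个元素的因子2总数，prefix5同理）
--     prefix2 = [0] * (len(nums) + 1)
--     prefix5 = [0] * (len(nums) + 1)
--     for i in range(len(nums)):
--         prefix2[i + 1] = prefix2[i] + cnt2[i]
--         prefix5[i + 1] = prefix5[i] + cnt5[i]
--
--     # 滑动窗口：寻找所有 [l+1, r] 满足 2总数≥k 且 5总数≥k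
--     ans = 0
--     left = 0  # 左指针（prefix的索引）
--     for right in range(1, len(prefix2)):
--         # 当前窗口 [left+1, right] 的因子2和5总数
--         total2 = prefix2[right] - prefix2[left]
--         total5 = prefix5[right] - prefix5[left]
--
--         # 移动左指针，确保窗口满足条件时尽可能小
--         while left < right:
--             current2 = prefix2[right] - prefix2[left]
--             current5 = prefix5[right] - prefix5[left]
--             if current2 >= k and current5 >= k:
--                 # 可以尝试左移，缩小窗口
--                 left += 1
--             else:
--                 # 不满足，停止左移
--                 break
--         # 此时 [left, right) 是满足条件的最小左边界，所有 [l, right) 其中 l ≤ left-1 都满足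
--         ans += left
--
--     return ans
-- ===== SOURCE B (Python) =====
-- from typing import List
--
-- # Alternative: instead of A's sliding window, use the fact that both prefix-count arrays
-- # are non-decreasing, so for each right end the valid left endpoints form a prefix [0, c);
-- # count them by binary search and take the min of the two counts.
-- # (A imports no stdlib bisect, so the binary search is written by hand.)
--
-- def _nfac(t: int, p: int) -> int:
--     if t == 0 or t % p != 0:
--         return 0
--     return 1 + _nfac(t // p, p)
--
-- def _bisect_right(a: List[int], x: int, lo: int, hi: int) -> int:
--     while lo < hi:
--         mid = (lo + hi) // 2
--         if x < a[mid]: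
--             hi = mid
--         else:
--             lo = mid + 1
--     return lo
--
-- def solve(nums: List[int], k: int) -> int:
--     n = len(nums)
--     if k == 0:
--         return n * (n + 1) // 2
--     p2, p5 = [0], [0]
--     s2 = s5 = 0
--     for num in nums:
--         s2 += _nfac(num, 2)
--         s5 += _nfac(num, 5)
--         p2.append(s2)
--         p5.append(s5)
--     ans = 0
--     for r in range(1, n + 1):
--         c2 = _bisect_right(p2, p2[r] - k, 0, r)
--         c5 = _bisect_right(p5, p5[r] - k, 0, r)
--         ans += min(c2, c5)
--     return ans
-- ===== Notes on version B (the rewrite author's own statement) =====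
-- stated objective: alternative
-- what changed: A's sliding-window left pointer (inner while loop re-checking both factor conditions) is replaced by, for each right end, a hand-written binary search on each non-decreasing prefix-count array: the valid left endpoints form a prefix [0,c), so the answer adds min of the two bisect counts; the factor counting is recursive and the prefix arrays are built by appending running sums instead of index assignment into preallocated arrays.
import Mathlib
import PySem

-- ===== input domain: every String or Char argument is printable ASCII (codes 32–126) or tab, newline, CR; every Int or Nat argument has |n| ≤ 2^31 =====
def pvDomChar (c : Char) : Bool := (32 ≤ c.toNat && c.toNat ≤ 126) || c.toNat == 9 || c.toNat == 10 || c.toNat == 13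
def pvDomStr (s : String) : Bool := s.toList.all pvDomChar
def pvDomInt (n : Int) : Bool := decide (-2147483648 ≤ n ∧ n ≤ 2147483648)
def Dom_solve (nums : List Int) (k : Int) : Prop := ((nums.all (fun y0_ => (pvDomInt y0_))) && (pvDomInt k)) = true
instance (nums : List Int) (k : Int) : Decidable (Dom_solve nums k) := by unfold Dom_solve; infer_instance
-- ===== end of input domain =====

-- B replaces A's sliding-window left pointer by a per-right binary search on the
-- non-decreasing prefix arrays (count of valid lefts = min of two bisect counts);
-- objective: alternative (genuinely different algorithm, similar cost).

-- termination helper cited by the factor-counting recursions of both ports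
theorem pvFacDec (t p : Int) (hp : 2 ≤ p) (h0 : t ≠ 0) (hd : p ∣ t) :
    (PySem.Int.floordiv t p).natAbs < t.natAbs := by
  obtain ⟨m, rfl⟩ := hd
  rw [PySem.Int.floordiv, Int.mul_fdiv_cancel_left _ (by omega)]
  have hm : m.natAbs ≠ 0 := by
    intro h; apply h0; rw [Int.natAbs_eq_zero] at h; simp [h]
  have h2 : 2 ≤ p.natAbs := by omega
  have := Nat.mul_le_mul_right (k := m.natAbs) h2
  simp only [Int.natAbs_mul]; omega

-- ===== PORT A =====
-- `while temp % 2 == 0 and temp != 0: c += 1; temp //= 2` (accumulator loop)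
def whileFac2 (temp : Int) (c : Int) : Int :=
  if h : PySem.Int.mod temp 2 = 0 ∧ temp ≠ 0 then
    whileFac2 (PySem.Int.floordiv temp 2) (c + 1)
  else c
termination_by temp.natAbs
decreasing_by
  exact pvFacDec temp 2 (by norm_num) h.2 ((PySem.Int.mod_eq_zero_iff_dvd _ _).mp h.1)

def whileFac5 (temp : Int) (c : Int) : Int :=
  if h : PySem.Int.mod temp 5 = 0 ∧ temp ≠ 0 then
    whileFac5 (PySem.Int.floordiv temp 5) (c + 1)
  else c
termination_by temp.natAbs
decreasing_by
  exact pvFacDec temp 5 (by norm_num) h.2 ((PySem.Int.mod_eq_zero_iff_dvd _ _).mp h.1)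

-- inner `while left < right: ... if cond: left += 1 else: break`
def advanceA (p2 p5 : List Int) (k : Int) (right left : Nat) : Nat :=
  if left < right then
    if k ≤ p2.getD right 0 - p2.getD left 0 ∧ k ≤ p5.getD right 0 - p5.getD left 0 then
      advanceA p2 p5 k right (left + 1)
    else left
  else left
termination_by right - left
decreasing_by omega

-- All list indices in A are nonnegative and in range (i < n into the cnt lists of length
-- n, j ≤ n into the prefix lists of length n+1), so `getD _ 0` / `set` render Python's
-- subscripting and item assignment exactly here.
def solve (nums : List Int) (k : Int) : Int :=
  if k = 0 then
    let n : Int := nums.length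
    PySem.Int.floordiv (n * (n + 1)) 2
  else
    let cs := nums.foldl
      (fun (acc : List Int × List Int) num =>
        (acc.1 ++ [whileFac2 num 0], acc.2 ++ [whileFac5 num 0])) ([], [])
    let n := nums.length
    let prs := (List.range n).foldl
      (fun (pr : List Int × List Int) i =>
        (pr.1.set (i + 1) (pr.1.getD i 0 + cs.1.getD i 0),
         pr.2.set (i + 1) (pr.2.getD i 0 + cs.2.getD i 0)))
      (List.replicate (n + 1) (0 : Int), List.replicate (n + 1) (0 : Int))
    let st := (List.range n).foldl
      (fun (st : Nat × Int) r0 =>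
        let l := advanceA prs.1 prs.2 k (r0 + 1) st.1
        (l, st.2 + (l : Int))) (0, 0)
    st.2

-- ===== PORT B =====
def nfac2 (t : Int) : Int :=
  if h : t = 0 ∨ PySem.Int.mod t 2 ≠ 0 then 0
  else 1 + nfac2 (PySem.Int.floordiv t 2)
termination_by t.natAbs
decreasing_by
  exact pvFacDec t 2 (by norm_num) (by tauto)
    ((PySem.Int.mod_eq_zero_iff_dvd _ _).mp (by tauto))

def nfac5 (t : Int) : Int :=
  if h : t = 0 ∨ PySem.Int.mod t 5 ≠ 0 then 0
  else 1 + nfac5 (PySem.Int.floordiv t 5)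
termination_by t.natAbs
decreasing_by
  exact pvFacDec t 5 (by norm_num) (by tauto)
    ((PySem.Int.mod_eq_zero_iff_dvd _ _).mp (by tauto))

-- hand-written binary search of Source B (the bisect module is unavailable: A imports only
-- typing); all indices probed are in range, so `getD _ 0` is exact
def bisectR (a : List Int) (x : Int) (lo hi : Nat) : Nat :=
  if lo < hi then
    let mid := (lo + hi) / 2
    if x < a.getD mid 0 then bisectR a x lo mid
    else bisectR a x (mid + 1) hi
  else lo
termination_by hi - lo
decreasing_by all_goals omega

def solve_alt (nums : List Int) (k : Int) : Int :=
  if k = 0 then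
    let n : Int := nums.length
    PySem.Int.floordiv (n * (n + 1)) 2
  else
    let st := nums.foldl
      (fun (st : (List Int × List Int) × (Int × Int)) num =>
        let s2 := st.2.1 + nfac2 num
        let s5 := st.2.2 + nfac5 num
        ((st.1.1 ++ [s2], st.1.2 ++ [s5]), (s2, s5)))
      (([0], [0]), (0, 0))
    (List.range nums.length).foldl
      (fun ans r0 =>
        let r := r0 + 1
        let c2 := bisectR st.1.1 (st.1.1.getD r 0 - k) 0 r
        let c5 := bisectR st.1.2 (st.1.2.getD r 0 - k) 0 r
        ans + ((min c2 c5 : Nat) : Int)) 0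

-- ===== PRECONDITION & SPEC =====
def Spec_solve (nums : List Int) (k : Int) (out : Int) : Prop := out = solve_alt nums k
instance (nums : List Int) (k : Int) (out : Int) : Decidable (Spec_solve nums k out) := by unfold Spec_solve; infer_instance

-- ===== CLAIM (what is proved, stated in full; the proofs are below) =====
def Claim_equal_solve : Prop := ∀ (nums : List Int) (k : Int), Dom_solve nums k → Spec_solve nums k (solve nums k)

-- ===== LEMMAS AND PROOFS =====

-- prefix weight: sum of f over the first j elements
def pw (f : Int → Int) (nums : List Int) (j : Nat) : Int := ((nums.take j).map f).sum

-- threshold count: number of l < r with pw l ≤ pw r - k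
def thr (f : Int → Int) (nums : List Int) (k : Int) (r : Nat) : Nat :=
  (List.range r).countP (fun l => decide (pw f nums l ≤ pw f nums r - k))

-- number of valid left endpoints for right end r
def Fv (nums : List Int) (k : Int) (r : Nat) : Nat :=
  min r (min (thr nfac2 nums k r) (thr nfac5 nums k r))

theorem nfac2_nonneg (t : Int) : 0 ≤ nfac2 t := by
  fun_induction nfac2 <;> simp_all <;> omega

theorem nfac5_nonneg (t : Int) : 0 ≤ nfac5 t := by
  fun_induction nfac5 <;> simp_all <;> omega

theorem whileFac2_eq (temp c : Int) : whileFac2 temp c = c + nfac2 temp := by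
  fun_induction whileFac2 with
  | case1 t c h ih =>
    rw [ih]
    conv_rhs => rw [nfac2, dif_neg (by tauto)]
    ring
  | case2 t c h =>
    conv_rhs => rw [nfac2, dif_pos (by tauto)]
    ring

theorem whileFac5_eq (temp c : Int) : whileFac5 temp c = c + nfac5 temp := by
  fun_induction whileFac5 with
  | case1 t c h ih =>
    rw [ih]
    conv_rhs => rw [nfac5, dif_neg (by tauto)]
    ring
  | case2 t c h =>
    conv_rhs => rw [nfac5, dif_pos (by tauto)]
    ring

theorem pw_succ (f : Int → Int) (nums : List Int) (j : Nat) (h : j < nums.length) :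
    pw f nums (j + 1) = pw f nums j + f (nums.getD j 0) := by
  unfold pw
  rw [List.take_succ, List.getElem?_eq_getElem h, List.map_append, List.sum_append]
  simp [List.getD_eq_getElem?_getD, List.getElem?_eq_getElem h]

theorem pw_mono (f : Int → Int) (hf : ∀ x, 0 ≤ f x) (nums : List Int) {j j' : Nat}
    (h : j ≤ j') : pw f nums j ≤ pw f nums j' := by
  induction j' with
  | zero => simp_all
  | succ m ih =>
    rcases Nat.lt_or_ge j (m + 1) with hlt | hge
    · have h1 : pw f nums j ≤ pw f nums m := ih (by omega)
      rcases Nat.lt_or_ge m nums.length with hm | hm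
      · rw [pw_succ f nums m hm]; have := hf (nums.getD m 0); omega
      · have h2 : pw f nums (m + 1) = pw f nums m := by
          unfold pw
          rw [List.take_of_length_le hm, List.take_of_length_le (by omega)]
        omega
    · have hj : j = m + 1 := by omega
      subst hj
      omega

theorem countP_range_threshold (q : Nat → Bool) (r : Nat)
    (hdc : ∀ i j : Nat, i ≤ j → q j = true → q i = true) :
    ∀ l < r, (q l = true ↔ l < (List.range r).countP q) := by
  induction r with
  | zero => omega
  | succ m ih =>
    intro l hl
    rw [List.range_succ, List.countP_append]
    by_cases hq : q m = true
    · have hall : ∀ i ∈ List.range m, q i = true := by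
        intro i hi; exact hdc i m (by simp at hi; omega) hq
      rw [List.countP_eq_length.mpr hall, show List.countP q [m] = 1 by simp [hq]]
      constructor
      · intro _; simp [List.length_range]; omega
      · intro _; exact hdc l m (by omega) hq
    · rw [show List.countP q [m] = 0 by
        simp only [List.countP_cons, List.countP_nil, Nat.zero_add]
        rw [if_neg (by simp [hq])], Nat.add_zero]
      rcases Nat.lt_or_ge l m with hlm | hlm
      · exact ih l hlm
      · have hcle : (List.range m).countP q ≤ m := by
          have := List.countP_le_length (p := q) (l := List.range m); simpa using this
        have hlm' : l = m := by omega
        subst hlm'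
        constructor
        · intro hc; exact absurd hc hq
        · intro hc; omega

theorem thr_iff (f : Int → Int) (hf : ∀ x, 0 ≤ f x) (nums : List Int) (k : Int)
    (r l : Nat) (hl : l < r) :
    (pw f nums l ≤ pw f nums r - k ↔ l < thr f nums k r) := by
  have := countP_range_threshold (fun l => decide (pw f nums l ≤ pw f nums r - k)) r
    (by intro i j hij hj
        simp only [decide_eq_true_eq] at *
        have := pw_mono f hf nums hij; omega) l hl
  simpa [thr] using this

theorem thr_mono (f : Int → Int) (hf : ∀ x, 0 ≤ f x) (nums : List Int) (k : Int)
    (r : Nat) : thr f nums k r ≤ thr f nums k (r + 1) := by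
  unfold thr
  calc (List.range r).countP (fun l => decide (pw f nums l ≤ pw f nums r - k))
      ≤ (List.range r).countP (fun l => decide (pw f nums l ≤ pw f nums (r+1) - k)) := by
        apply List.countP_mono_left
        intro x _ hx
        simp only [decide_eq_true_eq] at *
        have := pw_mono f hf nums (show r ≤ r + 1 by omega); omega
    _ ≤ (List.range (r+1)).countP (fun l => decide (pw f nums l ≤ pw f nums (r+1) - k)) := by
        rw [List.range_succ, List.countP_append]; omega

theorem Fv_mono (nums : List Int) (k : Int) (r : Nat) : Fv nums k r ≤ Fv nums k (r + 1) := by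
  unfold Fv
  have h2 := thr_mono nfac2 nfac2_nonneg nums k r
  have h5 := thr_mono nfac5 nfac5_nonneg nums k r
  omega

theorem take_sum_succ (cnt : List Int) (m : Nat) (h : m < cnt.length) :
    (cnt.take (m + 1)).sum = (cnt.take m).sum + cnt.getD m 0 := by
  rw [List.take_succ, List.getElem?_eq_getElem h, List.sum_append]
  simp [List.getD_eq_getElem?_getD, List.getElem?_eq_getElem h]

-- A's cnt-building fold splits componentwise into two maps
theorem cntfold (nums : List Int) :
    nums.foldl
      (fun (acc : List Int × List Int) num =>
        (acc.1 ++ [whileFac2 num 0], acc.2 ++ [whileFac5 num 0])) ([], [])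
    = (nums.map (fun x => nfac2 x), nums.map (fun x => nfac5 x)) := by
  rw [PySem.List.foldl_prod_mk (fun s e => s ++ [whileFac2 e 0])
    (fun s e => s ++ [whileFac5 e 0]) nums [] []]
  rw [PySem.List.foldl_append_singleton_eq_map, PySem.List.foldl_append_singleton_eq_map]
  simp only [List.nil_append, Prod.mk.injEq]
  constructor <;> (apply List.map_congr_left; intro a _; simp [whileFac2_eq, whileFac5_eq])

-- A's prefix-array fold splits componentwise
theorem prefixfold (c2 c5 : List Int) (n : Nat) :
    (List.range n).foldl
      (fun (pr : List Int × List Int) i =>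
        (pr.1.set (i + 1) (pr.1.getD i 0 + c2.getD i 0),
         pr.2.set (i + 1) (pr.2.getD i 0 + c5.getD i 0)))
      (List.replicate (n + 1) (0 : Int), List.replicate (n + 1) (0 : Int))
    = ((List.range n).foldl (fun p i => p.set (i + 1) (p.getD i 0 + c2.getD i 0))
        (List.replicate (n + 1) (0 : Int)),
       (List.range n).foldl (fun p i => p.set (i + 1) (p.getD i 0 + c5.getD i 0))
        (List.replicate (n + 1) (0 : Int))) :=
  PySem.List.foldl_prod_mk (fun (p : List Int) (i : Nat) => p.set (i + 1) (p.getD i 0 + c2.getD i 0))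
    (fun (p : List Int) (i : Nat) => p.set (i + 1) (p.getD i 0 + c5.getD i 0)) (List.range n) _ _

-- A's prefix-array fold: length is preserved …
theorem setfold_length (cnt : List Int) (l0 : List Nat) (init : List Int) :
    (l0.foldl (fun p i => p.set (i + 1) (p.getD i 0 + cnt.getD i 0)) init).length
      = init.length := by
  induction l0 generalizing init with
  | nil => rfl
  | cons a l ih => rw [List.foldl_cons, ih, List.length_set]

-- … and its entries are the partial sums of cnt
theorem setfold_getD (cnt : List Int) (n : Nat) (hn : cnt.length = n) :
    ∀ m ≤ n, ∀ j : Nat,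
      ((List.range m).foldl (fun p i => p.set (i + 1) (p.getD i 0 + cnt.getD i 0))
        (List.replicate (n + 1) (0 : Int))).getD j 0
      = if j ≤ m then (cnt.take j).sum else 0 := by
  intro m
  induction m with
  | zero =>
    intro _ j
    rw [List.range_zero, List.foldl_nil]
    split_ifs with hj
    · have : j = 0 := by omega
      subst this; simp
    · rcases Nat.lt_or_ge j (n + 1) with h | h
      · rw [List.getD_replicate _ h]
      · rw [List.getD_eq_getElem?_getD, List.getElem?_eq_none (by simpa using h)]; rfl
  | succ m ih =>
    intro hm j
    rw [List.range_succ, List.foldl_append, List.foldl_cons, List.foldl_nil]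
    have hlen : ((List.range m).foldl (fun p i => p.set (i + 1) (p.getD i 0 + cnt.getD i 0))
        (List.replicate (n + 1) (0 : Int))).length = n + 1 := by
      rw [setfold_length cnt]; simp
    rw [List.getD_eq_getElem?_getD, List.getElem?_set]
    by_cases he : m + 1 = j
    · rw [if_pos he, if_pos (by rw [hlen]; omega)]
      subst he
      simp only [Option.getD_some]
      rw [ih (by omega) m, if_pos (le_refl m), take_sum_succ cnt m (by omega),
          if_pos (le_refl (m + 1))]
    · rw [if_neg he, ← List.getD_eq_getElem?_getD, ih (by omega) j]
      by_cases hj : j ≤ m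
      · rw [if_pos hj, if_pos (by omega)]
      · rw [if_neg hj, if_neg (by omega)]

theorem map_take_sum (g : Int → Int) (nums : List Int) (j : Nat) :
    ((nums.map g).take j).sum = pw g nums j := by
  unfold pw
  rw [List.map_take]

theorem pw_append_le (f : Int → Int) (ys : List Int) (x : Int) (j : Nat)
    (h : j ≤ ys.length) : pw f (ys ++ [x]) j = pw f ys j := by
  unfold pw
  rw [List.take_append_of_le_length h]

theorem pw_append_top (f : Int → Int) (ys : List Int) (x : Int) :
    pw f (ys ++ [x]) (ys.length + 1) = pw f ys ys.length + f x := by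
  unfold pw
  rw [List.take_of_length_le (by simp), List.take_of_length_le (le_refl _)]
  simp

-- B's prefix fold: the lists are the prefix weights over range (n+1)
theorem bfoldB (nums : List Int) :
    nums.foldl
      (fun (st : (List Int × List Int) × (Int × Int)) num =>
        let s2 := st.2.1 + nfac2 num
        let s5 := st.2.2 + nfac5 num
        ((st.1.1 ++ [s2], st.1.2 ++ [s5]), (s2, s5)))
      (([0], [0]), (0, 0))
    = (((List.range (nums.length + 1)).map (fun j => pw nfac2 nums j),
        (List.range (nums.length + 1)).map (fun j => pw nfac5 nums j)),
       (pw nfac2 nums nums.length, pw nfac5 nums nums.length)) := by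
  induction nums using List.reverseRecOn with
  | nil => simp [pw, List.range_succ]
  | append_singleton ys x ih =>
    rw [List.foldl_append, ih, List.foldl_cons, List.foldl_nil]
    dsimp only
    have hlen : (ys ++ [x]).length = ys.length + 1 := by simp
    have h2 : ∀ f : Int → Int,
        (List.range (ys.length + 1)).map (fun j => pw f ys j) ++ [pw f ys ys.length + f x]
        = (List.range ((ys ++ [x]).length + 1)).map (fun j => pw f (ys ++ [x]) j) := by
      intro f
      have e1 : (List.range (ys.length + 1)).map (fun j => pw f (ys ++ [x]) j)
          = (List.range (ys.length + 1)).map (fun j => pw f ys j) :=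
        List.map_congr_left (fun a ha => by
          simp only [List.mem_range] at ha
          exact pw_append_le f ys x a (by omega))
      conv_rhs => rw [hlen, List.range_succ, List.map_append, e1]
      simp [pw_append_top]
    have hx2 := h2 nfac2
    have hx5 := h2 nfac5
    simp only [Prod.mk.injEq]
    exact ⟨⟨hx2, hx5⟩, by rw [hlen, pw_append_top], by rw [hlen, pw_append_top]⟩

-- binary search returns the threshold clamped to [lo, hi]
theorem bisect_clamp (a : List Int) (x : Int) (hi0 c : Nat)
    (hq : ∀ i, i < hi0 → (a.getD i 0 ≤ x ↔ i < c)) :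
    ∀ d lo hi, hi - lo = d → lo ≤ hi → hi ≤ hi0 →
      bisectR a x lo hi = min hi (max lo c) := by
  intro d
  induction d using Nat.strong_induction_on with
  | _ d ihd =>
    intro lo hi hd hlohi hhi
    rw [bisectR]
    by_cases h : lo < hi
    · rw [if_pos h]
      simp only []
      have hmid1 : lo ≤ (lo + hi) / 2 := by omega
      have hmid2 : (lo + hi) / 2 < hi := by omega
      by_cases hx : x < a.getD ((lo + hi) / 2) 0
      · rw [if_pos hx]
        have hcm : c ≤ (lo + hi) / 2 := by
          by_contra hcon
          have := (hq ((lo + hi) / 2) (by omega)).mpr (by omega)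
          omega
        rw [ihd ((lo + hi) / 2 - lo) (by omega) lo ((lo + hi) / 2) rfl (by omega) (by omega)]
        omega
      · rw [if_neg hx]
        have hcm : (lo + hi) / 2 < c := (hq ((lo + hi) / 2) (by omega)).mp (by omega)
        rw [ihd (hi - ((lo + hi) / 2 + 1)) (by omega) ((lo + hi) / 2 + 1) hi rfl (by omega) hhi]
        omega
    · rw [if_neg h]
      omega

-- the while-loop advances exactly to the clamped threshold
theorem advance_eq (p2 p5 : List Int) (k : Int) (right c : Nat)
    (hc : ∀ l, l < right →
      ((k ≤ p2.getD right 0 - p2.getD l 0 ∧ k ≤ p5.getD right 0 - p5.getD l 0) ↔ l < c)) :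
    ∀ d left, right - left = d → left ≤ min right c →
      advanceA p2 p5 k right left = min right c := by
  intro d
  induction d using Nat.strong_induction_on with
  | _ d ihd =>
    intro left hd hle
    rw [advanceA]
    by_cases h : left < right
    · rw [if_pos h]
      by_cases hcond : k ≤ p2.getD right 0 - p2.getD left 0 ∧ k ≤ p5.getD right 0 - p5.getD left 0
      · rw [if_pos hcond]
        have hlc : left < c := (hc left h).mp hcond
        exact ihd (right - (left + 1)) (by omega) (left + 1) rfl (by omega)
      · rw [if_neg hcond]
        have : ¬ left < c := fun hlt => hcond ((hc left h).mpr hlt)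
        omega
    · rw [if_neg h]
      omega

-- A's main loop: state after m rounds is (Fv m, Σ_{r=1..m} Fv r)
theorem loopA (nums : List Int) (k : Int) (p2 p5 : List Int)
    (hg2 : ∀ j, j ≤ nums.length → p2.getD j 0 = pw nfac2 nums j)
    (hg5 : ∀ j, j ≤ nums.length → p5.getD j 0 = pw nfac5 nums j) :
    ∀ m, m ≤ nums.length →
      (List.range m).foldl
        (fun (st : Nat × Int) r0 =>
          let l := advanceA p2 p5 k (r0 + 1) st.1
          (l, st.2 + (l : Int))) (0, 0)
      = (Fv nums k m,
         ((List.range m).map (fun r0 => ((Fv nums k (r0 + 1) : Nat) : Int))).sum) := by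
  intro m
  induction m with
  | zero => intro _; simp [Fv]
  | succ m ih =>
    intro hm
    rw [List.range_succ, List.foldl_append, ih (by omega), List.foldl_cons, List.foldl_nil]
    have hadv : advanceA p2 p5 k (m + 1) (Fv nums k m)
        = min (m + 1) (min (thr nfac2 nums k (m + 1)) (thr nfac5 nums k (m + 1))) := by
      apply advance_eq p2 p5 k (m + 1)
        (min (thr nfac2 nums k (m + 1)) (thr nfac5 nums k (m + 1)))
        ?_ ((m + 1) - Fv nums k m) (Fv nums k m) rfl ?_
      · intro l hl
        rw [hg2 (m + 1) (by omega), hg2 l (by omega), hg5 (m + 1) (by omega),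
            hg5 l (by omega)]
        have i2 := thr_iff nfac2 nfac2_nonneg nums k (m + 1) l hl
        have i5 := thr_iff nfac5 nfac5_nonneg nums k (m + 1) l hl
        omega
      · have := Fv_mono nums k m
        unfold Fv at *
        omega
    simp only [hadv]
    have hFv : Fv nums k (m + 1)
        = min (m + 1) (min (thr nfac2 nums k (m + 1)) (thr nfac5 nums k (m + 1))) := rfl
    rw [← hFv, List.map_append, List.sum_append]
    simp

-- B's main loop: each round contributes Fv (r0+1)
theorem loopB (nums : List Int) (k : Int) (p2 p5 : List Int)
    (hg2 : ∀ j, j ≤ nums.length → p2.getD j 0 = pw nfac2 nums j)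
    (hg5 : ∀ j, j ≤ nums.length → p5.getD j 0 = pw nfac5 nums j) :
    (List.range nums.length).foldl
      (fun ans r0 =>
        ans + ((min (bisectR p2 (p2.getD (r0 + 1) 0 - k) 0 (r0 + 1))
                    (bisectR p5 (p5.getD (r0 + 1) 0 - k) 0 (r0 + 1)) : Nat) : Int)) 0
    = ((List.range nums.length).map (fun r0 => ((Fv nums k (r0 + 1) : Nat) : Int))).sum := by
  rw [PySem.List.foldl_add]
  rw [Int.zero_add]
  congr 1
  apply List.map_congr_left
  intro r0 hr0
  simp only [List.mem_range] at hr0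
  have hb : ∀ (p : List Int) (f : Int → Int), (∀ x, 0 ≤ f x) →
      (∀ j, j ≤ nums.length → p.getD j 0 = pw f nums j) →
      bisectR p (p.getD (r0 + 1) 0 - k) 0 (r0 + 1) = min (r0 + 1) (thr f nums k (r0 + 1)) := by
    intro p f hf hg
    rw [bisect_clamp p (p.getD (r0 + 1) 0 - k) (r0 + 1) (thr f nums k (r0 + 1))
      (by intro i hi
          rw [hg i (by omega), hg (r0 + 1) (by omega)]
          exact thr_iff f hf nums k (r0 + 1) i hi)
      (r0 + 1) 0 (r0 + 1) rfl (by omega) (le_refl _)]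
    omega
  rw [hb p2 nfac2 nfac2_nonneg hg2, hb p5 nfac5 nfac5_nonneg hg5]
  congr 1
  unfold Fv
  omega

-- ===== VERDICT (by name: the statement is the Claim_ definition above) =====
theorem solve_spec : Claim_equal_solve := by
  unfold Claim_equal_solve Spec_solve
  intro nums k _
  by_cases hk : k = 0
  · simp [solve, solve_alt, hk]
  · have hg2A : ∀ j, j ≤ nums.length →
        ((List.range nums.length).foldl
          (fun p i => p.set (i + 1) (p.getD i 0 + (nums.map (fun x => nfac2 x)).getD i 0))
          (List.replicate (nums.length + 1) (0 : Int))).getD j 0 = pw nfac2 nums j := by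
      intro j hj
      rw [setfold_getD (nums.map (fun x => nfac2 x)) nums.length (by simp) nums.length
        (le_refl _) j, if_pos hj, map_take_sum]
    have hg5A : ∀ j, j ≤ nums.length →
        ((List.range nums.length).foldl
          (fun p i => p.set (i + 1) (p.getD i 0 + (nums.map (fun x => nfac5 x)).getD i 0))
          (List.replicate (nums.length + 1) (0 : Int))).getD j 0 = pw nfac5 nums j := by
      intro j hj
      rw [setfold_getD (nums.map (fun x => nfac5 x)) nums.length (by simp) nums.length
        (le_refl _) j, if_pos hj, map_take_sum]
    have hg2B : ∀ j, j ≤ nums.length →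
        ((List.range (nums.length + 1)).map (fun j => pw nfac2 nums j)).getD j 0
          = pw nfac2 nums j := by
      intro j hj
      exact PySem.List.getD_map_range _ _ _ _ (by omega)
    have hg5B : ∀ j, j ≤ nums.length →
        ((List.range (nums.length + 1)).map (fun j => pw nfac5 nums j)).getD j 0
          = pw nfac5 nums j := by
      intro j hj
      exact PySem.List.getD_map_range _ _ _ _ (by omega)
    simp only [solve, solve_alt, if_neg hk, cntfold, prefixfold, bfoldB]
    rw [loopA nums k _ _ hg2A hg5A nums.length (le_refl _)]
    exact (loopB nums k _ _ hg2B hg5B).symm
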